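-- pv_equiv track=rewrite | github.com/Karim-Ib/News-Notifications | oil_sentinel/oil_sentinel/accuracy/evaluator.py | _compute_streak
-- ===== SOURCE A (Python) =====
-- def _compute_streak(graded: list) -> int:
--     """
--     graded is sorted newest-first (only rows where prediction_correct is not None).
--     Returns +N for a correct streak of N, -N for a wrong streak of N, 0 if empty.
--     """
--     if not graded:
--         return 0
--     latest = graded[0]["prediction_correct"]
--     count = 0
--     for r in graded:
--         if r["prediction_correct"] == latest:
--             count += 1
--         else:
--             break
--     return count if latest == 1 else -count
-- ===== SOURCE B (Python) =====
-- from functools import reduce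
--
-- def _compute_streak(graded: list) -> int:
--     if not graded:
--         return 0
--     k = graded[0]["prediction_correct"]
--     # Right-to-left pass: the counter resets to 0 at every row whose judgment
--     # differs from k, so after the whole pass it equals the leading run length.
--     n = reduce(lambda acc, r: acc + 1 if r.get("prediction_correct") == k else 0,
--                reversed(graded), 0)
--     return n if k == 1 else -n
-- ===== Notes on version B (the rewrite author's own statement) =====
-- stated objective: alternative
-- what changed: Replaces the left-to-right count-with-break loop by a full right-to-left reduce whose accumulator resets to 0 at each mismatching row, so the final accumulator is the leading run length; there is no early exit and no 'latest'-sentinel loop.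
import Mathlib
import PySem

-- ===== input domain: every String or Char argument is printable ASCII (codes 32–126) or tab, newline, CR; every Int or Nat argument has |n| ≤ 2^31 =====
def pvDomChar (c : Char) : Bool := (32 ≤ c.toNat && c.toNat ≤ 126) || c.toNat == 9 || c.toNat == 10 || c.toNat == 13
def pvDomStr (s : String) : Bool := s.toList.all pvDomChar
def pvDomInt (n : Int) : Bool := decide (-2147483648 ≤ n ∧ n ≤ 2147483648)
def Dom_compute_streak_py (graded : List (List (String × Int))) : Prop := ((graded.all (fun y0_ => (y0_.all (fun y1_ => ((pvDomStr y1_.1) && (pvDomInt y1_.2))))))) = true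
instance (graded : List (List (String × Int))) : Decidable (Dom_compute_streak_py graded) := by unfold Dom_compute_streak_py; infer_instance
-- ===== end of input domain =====

-- B trades A's left-to-right count-with-break for a full right-to-left fold whose
-- accumulator resets at each mismatch (alternative decomposition, same linear cost).

-- ===== PORT A =====
-- first-match lookup of "prediction_correct" in a row (Python dict access; none = KeyError)
def pvKey (r : List (String × Int)) : Option Int :=
  (r.find? (fun p => p.1 == "prediction_correct")).map (·.2)

-- A's for-loop with break: count while equal to latest, stop at first mismatch
def pvCountA (latest : Int) : List (List (String × Int)) → Int
  | [] => 0
  | r :: rs => if (pvKey r).getD 0 == latest then 1 + pvCountA latest rs else 0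

def compute_streak_py (graded : List (List (String × Int))) : Int :=
  match graded with
  | [] => 0
  | r0 :: _ =>
    let latest := (pvKey r0).getD 0
    let count := pvCountA latest graded
    if latest == 1 then count else -count

-- ===== PORT B =====
def compute_streak_py_alt (graded : List (List (String × Int))) : Int :=
  match graded with
  | [] => 0
  | r0 :: rest =>
    let k := (pvKey r0).getD 0
    -- reduce over reversed(graded): right fold, accumulator resets to 0 on mismatch
    let n : Int := (r0 :: rest).foldr
      (fun r acc => if pvKey r == some k then acc + 1 else 0) 0
    if k == 1 then n else -n

-- ===== PRECONDITION & SPEC =====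
-- Pre_ excludes exactly the inputs on which A raises KeyError: the head row lacks the
-- key "prediction_correct", or the first row after the matching prefix lacks it.
def Pre_compute_streak_py (graded : List (List (String × Int))) : Prop :=
  graded = [] ∨
    ((pvKey (graded.headD [])).isSome = true ∧
      (let latest := (pvKey (graded.headD [])).getD 0;
       let L := graded.takeWhile (fun r => (pvKey r).isSome && (pvKey r).getD 0 == latest);
       L.length = graded.length ∨ (pvKey (graded.getD L.length [])).isSome = true))
instance (graded : List (List (String × Int))) : Decidable (Pre_compute_streak_py graded) := by unfold Pre_compute_streak_py; infer_instance
def pvWitness_compute_streak_py : (List (List (String × Int))) :=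
  [[("prediction_correct", 1)], [("prediction_correct", 1)], [("prediction_correct", 0)]]
def Spec_compute_streak_py (graded : List (List (String × Int))) (out : Int) : Prop := out = compute_streak_py_alt graded
instance (graded : List (List (String × Int))) (out : Int) : Decidable (Spec_compute_streak_py graded out) := by unfold Spec_compute_streak_py; infer_instance

-- ===== CLAIM (what is proved, stated in full; the proofs are below) =====
def Claim_equal_compute_streak_py : Prop := ∀ (graded : List (List (String × Int))), Dom_compute_streak_py graded → Pre_compute_streak_py graded → Spec_compute_streak_py graded (compute_streak_py graded)
-- ===== LEMMAS AND PROOFS =====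
-- Under Pre_'s scan condition, A's count-with-break equals B's reset-on-mismatch fold:
-- rows past the first mismatch cannot contribute, since the fold resets there.
theorem pvCountA_eq_foldr (latest : Int) (l : List (List (String × Int)))
    (h : (l.takeWhile (fun r => (pvKey r).isSome && (pvKey r).getD 0 == latest)).length = l.length
       ∨ (pvKey (l.getD (l.takeWhile (fun r => (pvKey r).isSome && (pvKey r).getD 0 == latest)).length [])).isSome = true) :
    pvCountA latest l = l.foldr (fun r acc => if pvKey r == some latest then acc + 1 else 0) 0 := by
  induction l with
  | nil => simp [pvCountA]
  | cons r rs ih =>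
    by_cases hp : ((pvKey r).isSome && (pvKey r).getD 0 == latest) = true
    · obtain ⟨hs, he⟩ := Bool.and_eq_true_iff.mp hp
      have hk : pvKey r = some latest := by
        cases hkr : pvKey r with
        | none => simp [hkr] at hs
        | some v => simp [hkr] at he ⊢; simpa using he
      have h' := h
      simp only [List.takeWhile_cons, hp, if_true, List.length_cons, List.getD] at h'
      have hrec : pvCountA latest rs = rs.foldr (fun r acc => if pvKey r == some latest then acc + 1 else 0) 0 := by
        apply ih
        rcases h' with h1 | h2
        · left; omega
        · right; simpa using h2
      have hcount : pvCountA latest (r :: rs) = 1 + pvCountA latest rs := by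
        simp [pvCountA, he]
      rw [hcount, hrec]
      simp only [List.foldr_cons, hk, beq_self_eq_true, if_true]
      omega
    · -- scan stops at r; Pre_ forces r to carry the key, with value ≠ latest
      simp only [List.takeWhile_cons, hp] at h
      rcases h with h1 | h2
      · simp at h1
      · simp only [List.getD] at h2
        cases hkr : pvKey r with
        | none => simp [hkr] at h2
        | some v =>
          have hv : v ≠ latest := by
            intro hc
            exact hp (by simp [hkr, hc])
          simp [pvCountA, hkr, hv]

-- ===== VERDICT (by name: the statement is the Claim_ definition above) =====
theorem compute_streak_py_spec : Claim_equal_compute_streak_py := by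
  intro graded _ hpre
  unfold Spec_compute_streak_py
  cases graded with
  | nil => rfl
  | cons r0 rest =>
    rcases hpre with h | ⟨_, h⟩
    · exact absurd h (by simp)
    · simp only [List.headD] at h
      simp only [compute_streak_py, compute_streak_py_alt]
      rw [pvCountA_eq_foldr _ _ h]
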